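-- pv_equiv track=rewrite | github.com/SebastianMeisel/org-parser | org_parser.py | parse_src_block_options
-- ===== SOURCE A (Python) =====
-- def parse_src_block_options(arg_string: str) -> dict[str, str]:
--     """
--     Parse Org src block header arguments.
--
--     Example:
--         'python :results output :session foo :tangle out.py'
--     ->  {'language': 'python', 'results': 'output', 'session': 'foo', 'tangle': 'out.py'}
--     """
--     tokens = arg_string.strip().split()
--     if not tokens:
--         return {}
--
--     options: dict[str, str] = {}
--     idx = 0
--
--     # First token is language unless it starts with ':'
--     if not tokens[0].startswith(":"):
--         options["language"] = tokens[0]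
--         idx = 1
--
--     # Parse pairs: :key value  (or :flag)
--     while idx < len(tokens):
--         token = tokens[idx]
--         if not token.startswith(":"):
--             idx += 1
--             continue
--
--         key = token[1:]
--         idx += 1
--
--         if idx >= len(tokens) or tokens[idx].startswith(":"):
--             options[key] = "true"
--             continue
--
--         options[key] = tokens[idx]
--         idx += 1
--
--     return options
-- ===== SOURCE B (Python) =====
-- def parse_src_block_options(arg_string: str) -> dict[str, str]:
--     """Single forward pass with a pending-key state instead of index lookahead."""
--     tokens = arg_string.split()
--     if not tokens:
--         return {}
--     options: dict[str, str] = {}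
--     rest = tokens
--     if not tokens[0].startswith(":"):
--         options["language"] = tokens[0]
--         rest = tokens[1:]
--     pending = None
--     for token in rest:
--         if token.startswith(":"):
--             key = token[1:]
--             options[key] = "true"
--             pending = key
--         elif pending is not None:
--             options[pending] = token
--             pending = None
--     return options
-- ===== Notes on version B (the rewrite author's own statement) =====
-- stated objective: alternative
-- what changed: Replaced A's index-based while-loop that peeks ahead at the next token by a single forward for-loop carrying a pending-key state variable: a colon-prefixed token is recorded with its default value and remembered, and the following plain token overwrites that default.
import Mathlib
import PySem

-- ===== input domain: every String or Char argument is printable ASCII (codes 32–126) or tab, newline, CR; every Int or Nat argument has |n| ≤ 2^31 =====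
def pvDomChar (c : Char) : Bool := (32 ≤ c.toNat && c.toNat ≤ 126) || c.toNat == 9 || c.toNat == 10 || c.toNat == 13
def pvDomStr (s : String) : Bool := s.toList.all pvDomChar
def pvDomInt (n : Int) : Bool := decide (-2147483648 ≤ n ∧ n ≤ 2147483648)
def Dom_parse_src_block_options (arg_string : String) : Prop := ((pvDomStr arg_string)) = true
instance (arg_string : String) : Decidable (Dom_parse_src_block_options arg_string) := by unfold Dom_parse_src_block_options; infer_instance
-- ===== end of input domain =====

-- B replaces A's index/lookahead while-loop by a single forward pass with a pending-key state (objective: alternative decomposition, same cost).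

-- ===== PORT A =====
-- A's while-loop over idx, transliterated as recursion on the remaining-token suffix
-- (idx advances ↔ the suffix shrinks; the lookahead tokens[idx] after idx += 1 is the head of rest).
def pvLoopA : List String → PySem.Dict String String → PySem.Dict String String
  | [], opts => opts
  | t :: rest, opts =>
    if PySem.Str.startswith t ":" = false then
      pvLoopA rest opts
    else
      let key := PySem.Str.slice t (some 1) none
      match rest with
      | [] => opts.insert key "true"
      | t2 :: rest2 =>
        if PySem.Str.startswith t2 ":" then
          pvLoopA (t2 :: rest2) (opts.insert key "true")
        else
          pvLoopA rest2 (opts.insert key t2)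

def parse_src_block_options (arg_string : String) : List (String × String) :=
  let tokens := PySem.Str.split₀ (PySem.Str.strip arg_string)
  match tokens with
  | [] => []
  | t0 :: rest =>
    if PySem.Str.startswith t0 ":" = false then
      (pvLoopA rest ((PySem.Dict.empty).insert "language" t0)).items
    else
      (pvLoopA (t0 :: rest) PySem.Dict.empty).items

-- ===== PORT B =====
-- B's single forward pass: state = (options, pending key)
def pvStepB (st : PySem.Dict String String × Option String) (tok : String) :
    PySem.Dict String String × Option String :=
  if PySem.Str.startswith tok ":" then
    let key := PySem.Str.slice tok (some 1) none
    (st.1.insert key "true", some key)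
  else
    match st.2 with
    | some k => (st.1.insert k tok, none)
    | none => st

def parse_src_block_options_alt (arg_string : String) : List (String × String) :=
  let tokens := PySem.Str.split₀ arg_string
  match tokens with
  | [] => []
  | t0 :: rest =>
    let init :=
      if PySem.Str.startswith t0 ":" = false then
        ((PySem.Dict.empty).insert "language" t0, rest)
      else
        ((PySem.Dict.empty : PySem.Dict String String), t0 :: rest)
    (init.2.foldl pvStepB (init.1, none)).1.items

-- ===== PRECONDITION & SPEC =====
def Spec_parse_src_block_options (arg_string : String) (out : List (String × String)) : Prop := out = parse_src_block_options_alt arg_string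
instance (arg_string : String) (out : List (String × String)) : Decidable (Spec_parse_src_block_options arg_string out) := by unfold Spec_parse_src_block_options; infer_instance

-- ===== CLAIM (what is proved, stated in full; the proofs are below) =====
def Claim_equal_parse_src_block_options : Prop := ∀ (arg_string : String), Dom_parse_src_block_options arg_string → Spec_parse_src_block_options arg_string (parse_src_block_options arg_string)

-- ===== LEMMAS AND PROOFS =====

-- split() already ignores leading/trailing whitespace, so A's extra strip() is a no-op for it:
theorem pvGoSpace (w : List Char) (hw : ∀ c ∈ w, PySem.Chars.isspace c = true)
    (cur : List Char) (acc : List (List Char)) :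
    PySem.Chars.split₀.go w cur acc = PySem.Chars.split₀.go [] cur acc := by
  induction w generalizing cur acc with
  | nil => rfl
  | cons c rest ih =>
    have hc := hw c (by simp)
    have hw' : ∀ x ∈ rest, PySem.Chars.isspace x = true := fun x hx => hw x (by simp [hx])
    conv_lhs => rw [PySem.Chars.split₀.go]
    rw [if_pos hc]
    by_cases hcur : cur.isEmpty
    · rw [if_pos hcur, ih hw']
      rw [PySem.Chars.split₀.go, PySem.Chars.split₀.go]
      cases cur <;> simp_all
    · rw [if_neg hcur, ih hw']
      rw [PySem.Chars.split₀.go, PySem.Chars.split₀.go]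
      cases cur <;> simp_all

theorem pvGoTrail (l w : List Char) (hw : ∀ c ∈ w, PySem.Chars.isspace c = true)
    (cur : List Char) (acc : List (List Char)) :
    PySem.Chars.split₀.go (l ++ w) cur acc = PySem.Chars.split₀.go l cur acc := by
  induction l generalizing cur acc with
  | nil => simpa using pvGoSpace w hw cur acc
  | cons c rest ih =>
    rw [List.cons_append, PySem.Chars.split₀.go]
    conv_rhs => rw [PySem.Chars.split₀.go]
    by_cases hc : PySem.Chars.isspace c = true
    · rw [if_pos hc, if_pos hc]
      by_cases hcur : cur.isEmpty <;> simp only [hcur, if_true, ih]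
    · rw [if_neg hc, if_neg hc, ih]

theorem pvGoLstrip (l : List Char) (acc : List (List Char)) :
    PySem.Chars.split₀.go l [] acc = PySem.Chars.split₀.go (l.dropWhile PySem.Chars.isspace) [] acc := by
  induction l with
  | nil => rfl
  | cons c rest ih =>
    by_cases hc : PySem.Chars.isspace c = true
    · conv_lhs => rw [PySem.Chars.split₀.go]
      simp [hc, ih]
    · simp [hc]

theorem pvSplitStrip (l : List Char) :
    PySem.Chars.split₀ (PySem.Chars.strip l) = PySem.Chars.split₀ l := by
  unfold PySem.Chars.split₀ PySem.Chars.strip PySem.Chars.rstrip PySem.Chars.lstrip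
  have hsp : ∀ c ∈ (List.takeWhile PySem.Chars.isspace (List.dropWhile PySem.Chars.isspace l).reverse).reverse,
      PySem.Chars.isspace c = true := by
    intro c hc
    exact List.mem_takeWhile_imp (by simpa using hc)
  have hdec : List.dropWhile PySem.Chars.isspace l =
      (List.dropWhile PySem.Chars.isspace (List.dropWhile PySem.Chars.isspace l).reverse).reverse ++
      (List.takeWhile PySem.Chars.isspace (List.dropWhile PySem.Chars.isspace l).reverse).reverse := by
    conv_lhs => rw [← List.reverse_reverse (List.dropWhile PySem.Chars.isspace l),
      ← List.takeWhile_append_dropWhile (p := PySem.Chars.isspace) (l := (List.dropWhile PySem.Chars.isspace l).reverse)]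
    rw [List.reverse_append]
  rw [pvGoLstrip l]
  conv_rhs => rw [hdec]
  rw [pvGoTrail _ _ hsp]

theorem pvStripSplit (s : String) : PySem.Str.split₀ (PySem.Str.strip s) = PySem.Str.split₀ s := by
  simp [PySem.Str.split₀, pvSplitStrip]

-- evaluation lemmas for B's step function
theorem pvStepB_pos (st : PySem.Dict String String × Option String) (tok : String)
    (h : PySem.Str.startswith tok ":" = true) :
    pvStepB st tok = (st.1.insert (PySem.Str.slice tok (some 1) none) "true",
      some (PySem.Str.slice tok (some 1) none)) := by
  unfold pvStepB; rw [if_pos h]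

theorem pvStepB_neg_some (o : PySem.Dict String String) (k : String) (tok : String)
    (h : ¬ PySem.Str.startswith tok ":" = true) :
    pvStepB (o, some k) tok = (o.insert k tok, none) := by
  unfold pvStepB; rw [if_neg h]

theorem pvStepB_neg_none (o : PySem.Dict String String) (tok : String)
    (h : ¬ PySem.Str.startswith tok ":" = true) :
    pvStepB (o, none) tok = (o, none) := by
  unfold pvStepB; rw [if_neg h]

-- when the next token starts with ':', B's incoming pending key is irrelevant
theorem pvFold_pending_irrel (t : String) (rest : List String)
    (o : PySem.Dict String String) (p p' : Option String)
    (h : PySem.Str.startswith t ":" = true) :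
    (t :: rest).foldl pvStepB (o, p) = (t :: rest).foldl pvStepB (o, p') := by
  rw [List.foldl_cons, List.foldl_cons, pvStepB_pos _ _ h, pvStepB_pos _ _ h]

-- definitional unfoldings of A's loop
theorem pvLoopA_one (t : String) (opts : PySem.Dict String String) :
    pvLoopA [t] opts =
      if PySem.Str.startswith t ":" = false then pvLoopA [] opts
      else opts.insert (PySem.Str.slice t (some 1) none) "true" := rfl

theorem pvLoopA_cons_cons (t t2 : String) (rest2 : List String) (opts : PySem.Dict String String) :
    pvLoopA (t :: t2 :: rest2) opts =
      if PySem.Str.startswith t ":" = false then pvLoopA (t2 :: rest2) opts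
      else if PySem.Str.startswith t2 ":" then
        pvLoopA (t2 :: rest2) (opts.insert (PySem.Str.slice t (some 1) none) "true")
      else pvLoopA rest2 (opts.insert (PySem.Str.slice t (some 1) none) t2) := rfl

-- A's lookahead loop equals B's pending-state fold
theorem pvLoopA_eq_fold (ts : List String) (opts : PySem.Dict String String) :
    pvLoopA ts opts = (ts.foldl pvStepB (opts, none)).1 := by
  induction ts, opts using pvLoopA.induct with
  | case1 opts => simp [pvLoopA]
  | case2 t rest opts h ih =>
    have hne : ¬ PySem.Str.startswith t ":" = true := by rw [h]; simp
    cases rest with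
    | nil => rw [pvLoopA_one, if_pos h, List.foldl_cons, pvStepB_neg_none _ _ hne]; exact ih
    | cons t2 rest2 =>
      rw [pvLoopA_cons_cons, if_pos h, List.foldl_cons, pvStepB_neg_none _ _ hne]; exact ih
  | case3 t opts h =>
    have h' : PySem.Str.startswith t ":" = true := by rw [← Bool.not_eq_false]; exact h
    rw [pvLoopA_one, if_neg h, List.foldl_cons, pvStepB_pos (opts, none) t h']
    rfl
  | case4 t opts h key t2 rest2 h2 ih =>
    have h' : PySem.Str.startswith t ":" = true := by rw [← Bool.not_eq_false]; exact h
    rw [pvLoopA_cons_cons, if_neg h, if_pos h2, List.foldl_cons, pvStepB_pos (opts, none) t h',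
      pvFold_pending_irrel t2 rest2 _ _ none h2]
    exact ih
  | case5 t opts h key t2 rest2 h2 ih =>
    have h' : PySem.Str.startswith t ":" = true := by rw [← Bool.not_eq_false]; exact h
    rw [pvLoopA_cons_cons, if_neg h, if_neg h2, List.foldl_cons, pvStepB_pos (opts, none) t h',
      List.foldl_cons, pvStepB_neg_some _ _ _ h2, PySem.Dict.insert_insert_self]
    exact ih

-- ===== VERDICT (by name: the statement is the Claim_ definition above) =====
theorem parse_src_block_options_spec : Claim_equal_parse_src_block_options := by
  intro s _
  unfold Spec_parse_src_block_options parse_src_block_options parse_src_block_options_alt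
  rw [pvStripSplit]
  cases h : PySem.Str.split₀ s with
  | nil => rfl
  | cons t0 rest =>
    dsimp only
    by_cases h0 : PySem.Str.startswith t0 ":" = false
    · rw [if_pos h0, if_pos h0, pvLoopA_eq_fold]
    · rw [if_neg h0, if_neg h0, pvLoopA_eq_fold]
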